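-- pv_equiv track=rewrite | github.com/tsilva/runbook | scripts/make_style_mix_dataset.py | valid_messages
-- ===== SOURCE A (Python) =====
-- from typing import Any
--
-- def valid_messages(messages: Any) -> bool:
--     if not isinstance(messages, list) or len(messages) < 2:
--         return False
--     has_user = False
--     has_assistant = False
--     for message in messages:
--         if not isinstance(message, dict):
--             return False
--         role = message.get("role")
--         content = message.get("content")
--         if role == "user" and isinstance(content, str) and content.strip():
--             has_user = True
--         if role == "assistant" and isinstance(content, str) and content.strip():
--             has_assistant = True
--     return has_user and has_assistant
-- ===== SOURCE B (Python) =====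
-- def valid_messages(messages) -> bool:
--     if not isinstance(messages, list) or len(messages) < 2:
--         return False
--     if not all(isinstance(m, dict) for m in messages):
--         return False
--
--     def ok(m, role):
--         content = m.get("content")
--         return m.get("role") == role and isinstance(content, str) and bool(content.strip())
--
--     return any(ok(m, "user") for m in messages) and any(ok(m, "assistant") for m in messages)
-- ===== Notes on version B (the rewrite author's own statement) =====
-- stated objective: simpler
-- what changed: Replaces the single stateful pass maintaining two boolean flags with an up-front all-dict guard followed by two independent existential any() scans for a valid user and a valid assistant message.
import Mathlib
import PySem

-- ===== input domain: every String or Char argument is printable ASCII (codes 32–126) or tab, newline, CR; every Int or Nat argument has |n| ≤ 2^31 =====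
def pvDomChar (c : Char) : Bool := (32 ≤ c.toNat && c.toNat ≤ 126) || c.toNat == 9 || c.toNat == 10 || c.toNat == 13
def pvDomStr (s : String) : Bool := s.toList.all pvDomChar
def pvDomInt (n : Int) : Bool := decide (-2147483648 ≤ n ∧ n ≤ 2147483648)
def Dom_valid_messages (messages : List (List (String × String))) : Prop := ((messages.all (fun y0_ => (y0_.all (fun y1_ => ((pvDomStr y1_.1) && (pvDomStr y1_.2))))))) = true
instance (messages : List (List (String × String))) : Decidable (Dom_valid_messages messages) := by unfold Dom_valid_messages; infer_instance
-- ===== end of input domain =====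

-- B replaces A's single stateful two-flag pass with a guard plus two independent existential scans (objective: simpler).
-- ===== PORT A =====
-- dict.get(k): first-match lookup in the association list (Python dicts have unique keys)
def pvGet (m : List (String × String)) (k : String) : Option String :=
  (m.find? (fun p => p.1 == k)).map (·.2)

-- truthiness of content.strip() guarded by isinstance(content, str) (always a str under the typing)
def pvTruthy : Option String → Bool
  | some c => !(PySem.Str.strip c == "")
  | none => false

def valid_messages (messages : List (List (String × String))) : Bool :=
  if messages.length < 2 then false
  else
    let st := messages.foldl (fun (st : Bool × Bool) message =>
      let role := pvGet message "role"
      let content := pvGet message "content"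
      let hu := if role == some "user" && pvTruthy content then true else st.1
      let ha := if role == some "assistant" && pvTruthy content then true else st.2
      (hu, ha)) (false, false)
    st.1 && st.2

-- ===== PORT B =====
-- ok(m, role) from Source B (the isinstance checks are identically true under the typing)
def pvOk (m : List (String × String)) (role : String) : Bool :=
  pvGet m "role" == some role && pvTruthy (pvGet m "content")

def valid_messages_alt (messages : List (List (String × String))) : Bool :=
  if messages.length < 2 then false
  else
    messages.any (fun m => pvOk m "user") && messages.any (fun m => pvOk m "assistant")

-- ===== PRECONDITION & SPEC =====
def Spec_valid_messages (messages : List (List (String × String))) (out : Bool) : Prop := out = valid_messages_alt messages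
instance (messages : List (List (String × String))) (out : Bool) : Decidable (Spec_valid_messages messages out) := by unfold Spec_valid_messages; infer_instance

-- ===== CLAIM (what is proved, stated in full; the proofs are below) =====
def Claim_equal_valid_messages : Prop := ∀ (messages : List (List (String × String))), Dom_valid_messages messages → Spec_valid_messages messages (valid_messages messages)

-- ===== LEMMAS AND PROOFS =====

-- ===== VERDICT (by name: the statement is the Claim_ definition above) =====
lemma fold_inv (ms : List (List (String × String))) (hu ha : Bool) :
    ms.foldl (fun (st : Bool × Bool) message =>
      let role := pvGet message "role"
      let content := pvGet message "content"
      let hu := if role == some "user" && pvTruthy content then true else st.1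
      let ha := if role == some "assistant" && pvTruthy content then true else st.2
      (hu, ha)) (hu, ha)
    = (hu || ms.any (fun m => pvOk m "user"), ha || ms.any (fun m => pvOk m "assistant")) := by
  induction ms generalizing hu ha with
  | nil => simp
  | cons m ms ih =>
    simp only [List.foldl_cons, List.any_cons, ih, pvOk, Prod.mk.injEq]
    constructor
    · cases hc : (pvGet m "role" == some "user" && pvTruthy (pvGet m "content")) <;> simp
    · cases hc : (pvGet m "role" == some "assistant" && pvTruthy (pvGet m "content")) <;> simp

theorem valid_messages_spec : Claim_equal_valid_messages := by
  intro ms _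
  unfold Spec_valid_messages valid_messages valid_messages_alt
  split
  · rfl
  · rw [fold_inv]
    simp
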